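-- pv_equiv track=rewrite | github.com/pypi-data/pypi-mirror-7 | packages/excentury/excentury-0.2b0.tar.gz/excentury-0.2b0/excentury/lang/__init__.py | format_return
-- ===== SOURCE A (Python) =====
-- def format_return(ret):
--     """Given the return statement, replace all instances of @ret with
--     XC_DI_. """
--     ret = ret.strip()
--     res = ''
--     caret = 0
--     index = ret.find('@ret{', caret)
--     while index != -1:
--         res += ret[caret:index]
--         caret = index + 5
--         res += 'XC_DI_.dump('
--         index_end = ret.find('}', caret)
--         if index == -1:
--             index = len(ret)
--         args = [ele.strip() for ele in ret[caret:index_end].split(',')]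
--         if len(args) == 2 and args[1][0] not in ['"', "'"]:
--             args.insert(1, '"%s"' % args[0])
--         elif len(args) == 1:
--             args.append('"%s"' % args[0].strip())
--         res += '%s);' % ', '.join(args)
--         caret = index_end+1
--         index = ret.find('@ret{', caret)
--     res += ret[caret:]
--     return res
-- ===== SOURCE B (Python) =====
-- def _dump(body):
--     args = [e.strip() for e in body.split(',')]
--     if len(args) == 2 and args[1][0] not in ('"', "'"):
--         args.insert(1, '"%s"' % args[0])
--     elif len(args) == 1:
--         args.append('"%s"' % args[0].strip())
--     return 'XC_DI_.dump(%s);' % ', '.join(args)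
--
--
-- def _fmt(s):
--     before, marker, rest = s.partition('@ret{')
--     if not marker:
--         return s
--     body, brace, tail = rest.partition('}')
--     if not brace:
--         return s
--     return before + _dump(body) + _fmt(tail)
--
--
-- def format_return(ret):
--     return _fmt(ret.strip())
-- ===== Notes on version B (the rewrite author's own statement) =====
-- stated objective: simpler
-- what changed: A's manual caret/find index loop with an accumulator string is replaced by a short recursive decomposition using str.partition that splits off one marker at a time and rebuilds the string front-to-back.
-- outside the precondition, e.g. on format_return('@ret{a,@ret{,}'): A returns 'XC_DI_.dump(a, @ret{, );', B returns 'XC_DI_.dump(a, @ret{, );'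
import Mathlib
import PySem

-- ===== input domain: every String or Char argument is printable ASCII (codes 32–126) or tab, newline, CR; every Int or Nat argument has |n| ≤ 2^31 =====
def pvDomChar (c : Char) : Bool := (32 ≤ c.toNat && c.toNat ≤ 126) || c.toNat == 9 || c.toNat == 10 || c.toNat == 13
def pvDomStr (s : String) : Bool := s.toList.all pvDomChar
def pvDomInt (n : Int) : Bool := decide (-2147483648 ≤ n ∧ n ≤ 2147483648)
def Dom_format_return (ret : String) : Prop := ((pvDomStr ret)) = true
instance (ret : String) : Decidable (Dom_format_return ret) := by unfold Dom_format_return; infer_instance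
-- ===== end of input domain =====

-- B replaces A's manual caret/find index loop and string accumulator by a recursive
-- partition-based decomposition (simpler, same cost); return value only, no mutation involved.

-- ===== PORT A =====

-- the args fix-up and ' ', '.join(args)' + ');' tail, exactly as the body of A's loop builds it
def fmtArgsA (chunk : List Char) : List Char :=
  let args := (PySem.Chars.splitOn chunk [',']).map PySem.Chars.strip
  let args :=
    if args.length == 2 &&
        (match PySem.List.pyGet? (args.getD 1 []) 0 with
         | some c => !(c == '"' || c == '\'')
         | none => false) then        -- none: Python raises IndexError here; such inputs are outside Pre_
      PySem.List.insert args 1 ('"' :: (args.getD 0 [] ++ ['"']))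
    else if args.length == 1 then
      args ++ ['"' :: (PySem.Chars.strip (args.getD 0 []) ++ ['"'])]
    else args
  PySem.Chars.join [',', ' '] args ++ [')', ';']

-- A's while loop; fuel only bounds the iteration count (each iteration advances caret by ≥ 6,
-- so fuel = length + 1 is never exhausted on inputs where the Python loop terminates)
def fmtLoopA (s : List Char) (res : List Char) (caret : Int) (fuel : Nat) : List Char :=
  match fuel with
  | 0 => res ++ PySem.Chars.slice s (some caret) none
  | fuel + 1 =>
    let index := PySem.Chars.findFrom s ['@', 'r', 'e', 't', '{'] caret
    if index == -1 then
      res ++ PySem.Chars.slice s (some caret) none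
    else
      let res := res ++ PySem.Chars.slice s (some caret) (some index)
      let caret := index + 5
      let res := res ++ "XC_DI_.dump(".toList
      let index_end := PySem.Chars.findFrom s ['}'] caret
      let _index := if index == -1 then (s.length : Int) else index  -- dead reassignment, kept from A
      let res := res ++ fmtArgsA (PySem.Chars.slice s (some caret) (some index_end))
      let caret := index_end + 1
      fmtLoopA s res caret fuel

def format_return (ret : String) : String :=
  let s := PySem.Chars.strip ret.toList
  String.ofList (fmtLoopA s [] 0 (s.length + 1))

-- ===== PORT B =====

-- hand port of str.partition(sep) via str.find; exact for nonempty sep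
def pyPartition (s sep : List Char) : List Char × List Char × List Char :=
  let i := PySem.Chars.find s sep
  if i == -1 then (s, [], [])
  else (PySem.Chars.slice s none (some i), sep, PySem.Chars.slice s (some (i + sep.length)) none)

-- port of B's _dump
def fmtDumpB (body : List Char) : List Char :=
  let args := (PySem.Chars.splitOn body [',']).map PySem.Chars.strip
  let args :=
    if args.length == 2 &&
        (match PySem.List.pyGet? (args.getD 1 []) 0 with
         | some c => !(c == '"' || c == '\'')
         | none => false) then        -- none: Python raises IndexError here; such inputs are outside Pre_
      PySem.List.insert args 1 ('"' :: (args.getD 0 [] ++ ['"']))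
    else if args.length == 1 then
      args ++ ['"' :: (PySem.Chars.strip (args.getD 0 []) ++ ['"'])]
    else args
  "XC_DI_.dump(".toList ++ PySem.Chars.join [',', ' '] args ++ ");".toList

-- port of B's recursive _fmt; fuel is only a termination bound (each step removes ≥ 6 chars)
def fmtGoB (s : List Char) (fuel : Nat) : List Char :=
  match fuel with
  | 0 => s
  | fuel + 1 =>
    let (before, marker, rest) := pyPartition s "@ret{".toList
    if marker.isEmpty then s
    else
      let (body, brace, tail) := pyPartition rest ['}']
      if brace.isEmpty then s
      else before ++ fmtDumpB body ++ fmtGoB tail fuel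

def format_return_alt (ret : String) : String :=
  let s := PySem.Chars.strip ret.toList
  String.ofList (fmtGoB s (s.length + 1))

-- ===== PRECONDITION & SPEC =====

-- Pre_ excludes inputs on which A diverges (an occurrence of '@ret{' with no later '}') or raises
-- IndexError (a two-argument body whose second argument strips to ''); conservatively it constrains
-- EVERY occurrence of '@ret{' in the stripped string, also ones lying inside another marker's body
-- (on which A still returns), because which occurrences A processes depends on its scan.
def PreMarkers (t : List Char) : Prop :=
  ∀ i : Nat, i < t.length → "@ret{".toList <+: t.drop i →
    (PySem.Chars.find (t.drop (i + 5)) ['}'] ≠ -1 ∧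
     ¬(((PySem.Chars.splitOn ((t.drop (i + 5)).take (PySem.Chars.find (t.drop (i + 5)) ['}']).toNat)
          [',']).map PySem.Chars.strip).length = 2 ∧
       ((PySem.Chars.splitOn ((t.drop (i + 5)).take (PySem.Chars.find (t.drop (i + 5)) ['}']).toNat)
          [',']).map PySem.Chars.strip).getD 1 [] = []))

def Pre_format_return (ret : String) : Prop := PreMarkers (PySem.Chars.strip ret.toList)
instance (ret : String) : Decidable (Pre_format_return ret) := by
  unfold Pre_format_return PreMarkers; infer_instance

def pvWitness_format_return : String := " x = @ret{a, b}; @ret{n} "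

def Spec_format_return (ret : String) (out : String) : Prop := out = format_return_alt ret
instance (ret : String) (out : String) : Decidable (Spec_format_return ret out) := by
  unfold Spec_format_return; infer_instance

-- ===== CLAIM =====
def Claim_equal_format_return : Prop :=
  ∀ (ret : String), Dom_format_return ret → Pre_format_return ret →
    Spec_format_return ret (format_return ret)

-- ===== LEMMAS AND PROOFS =====

theorem fmtDumpB_eq (body : List Char) :
    fmtDumpB body = "XC_DI_.dump(".toList ++ fmtArgsA body := by
  unfold fmtDumpB fmtArgsA
  simp

theorem find_prefix (d sub : List Char) (h : PySem.Chars.find d sub ≠ -1) :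
    sub <+: d.drop (PySem.Chars.find d sub).toNat := by
  have := PySem.Chars.findFrom_natCast_spec d sub 0 (Nat.zero_le _)
  simp at this
  exact (this h).2.1

theorem find_nonneg' (d sub : List Char) (h : PySem.Chars.find d sub ≠ -1) :
    0 ≤ PySem.Chars.find d sub := by
  have := PySem.Chars.neg_one_le_find d sub
  omega

theorem fmt_main (t : List Char) (hok : PreMarkers t) :
    ∀ (n : Nat) (c : Nat) (res : List Char), c ≤ t.length → t.length - c < n →
      fmtLoopA t res (c : Int) n = res ++ fmtGoB (t.drop c) n := by
  intro n
  induction n with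
  | zero => intro c res hc hf; omega
  | succ n ih =>
    intro c res hc hf
    have hpat : ("@ret{".toList : List Char) = ['@', 'r', 'e', 't', '{'] := rfl
    unfold fmtLoopA fmtGoB pyPartition
    simp only [hpat]
    rw [PySem.Chars.findFrom_natCast t ['@', 'r', 'e', 't', '{'] c hc]
    by_cases h : PySem.Chars.find (t.drop c) ['@', 'r', 'e', 't', '{'] = -1
    · simp [h, PySem.List.slice_from_natCast]
    · -- marker found at offset m' in t.drop c
      have hm0 : 0 ≤ PySem.Chars.find (t.drop c) ['@', 'r', 'e', 't', '{'] := find_nonneg' _ _ h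
      obtain ⟨m', hm⟩ : ∃ m' : Nat, PySem.Chars.find (t.drop c) ['@', 'r', 'e', 't', '{'] = (m' : Int) :=
        ⟨_, (Int.toNat_of_nonneg hm0).symm⟩
      have hpre : ['@', 'r', 'e', 't', '{'] <+: t.drop (c + m') := by
        have := find_prefix (t.drop c) _ h
        rwa [hm, Int.toNat_natCast, List.drop_drop] at this
      have hlen5 : c + m' + 5 ≤ t.length := by
        have h1 := List.IsPrefix.length_le hpre
        rw [List.length_drop] at h1
        simp at h1; omega
      have hok' := hok (c + m') (by omega) (by rw [hpat]; exact hpre)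
      have he : PySem.Chars.find (t.drop (c + m' + 5)) ['}'] ≠ -1 := hok'.1
      have he0 : 0 ≤ PySem.Chars.find (t.drop (c + m' + 5)) ['}'] := find_nonneg' _ _ he
      obtain ⟨e', heq⟩ : ∃ e' : Nat, PySem.Chars.find (t.drop (c + m' + 5)) ['}'] = (e' : Int) :=
        ⟨_, (Int.toNat_of_nonneg he0).symm⟩
      have hepre : ['}'] <+: (t.drop (c + m' + 5)).drop e' := by
        have := find_prefix (t.drop (c + m' + 5)) ['}'] he
        rwa [heq, Int.toNat_natCast] at this
      have helen : c + m' + 5 + e' < t.length := by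
        have h1 := List.IsPrefix.length_le hepre
        rw [List.length_drop, List.length_drop] at h1
        simp at h1; omega
      -- the find/findFrom results, in simp-normal cast form
      have hfe : PySem.Chars.findFrom t ['}'] ((c : Int) + (m' : Int) + 5) = (c : Int) + (m' : Int) + 5 + (e' : Int) := by
        have h5 : ((c : Int) + (m' : Int) + 5) = ((c + m' + 5 : Nat) : Int) := by push_cast; ring
        rw [h5, PySem.Chars.findFrom_natCast t _ _ hlen5, if_neg he, heq]
      -- slices, A side
      have hs1 : PySem.List.slice t (some (c : Int)) (some ((c : Int) + (m' : Int))) = (t.drop c).take m' := by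
        have h5 : ((c : Int) + (m' : Int)) = ((c + m' : Nat) : Int) := by push_cast; ring
        rw [h5, PySem.List.slice_natCast, show c + m' - c = m' from by omega]
      have hs2 : PySem.List.slice t (some ((c : Int) + (m' : Int) + 5)) (some ((c : Int) + (m' : Int) + 5 + (e' : Int))) =
          (t.drop (c + m' + 5)).take e' := by
        have h5 : ((c : Int) + (m' : Int) + 5) = ((c + m' + 5 : Nat) : Int) := by push_cast; ring
        have h6 : ((c : Int) + (m' : Int) + 5 + (e' : Int)) = ((c + m' + 5 + e' : Nat) : Int) := by push_cast; ring
        rw [h6, h5, PySem.List.slice_natCast, show c + m' + 5 + e' - (c + m' + 5) = e' from by omega]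
      -- B side pieces (on t.drop c)
      have hbrest : PySem.List.slice (t.drop c) (some ((m' : Int) + 5)) none = t.drop (c + m' + 5) := by
        have h5 : ((m' : Int) + 5) = ((m' + 5 : Nat) : Int) := by push_cast; ring
        rw [h5, PySem.List.slice_from_natCast, List.drop_drop, show c + (m' + 5) = c + m' + 5 from by omega]
      have hbtail : PySem.List.slice (t.drop (c + m' + 5)) (some ((e' : Int) + 1)) none =
          t.drop (c + m' + 5 + e' + 1) := by
        have h1 : ((e' : Int) + 1) = ((e' + 1 : Nat) : Int) := by push_cast; ring
        rw [h1, PySem.List.slice_from_natCast, List.drop_drop,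
          show c + m' + 5 + (e' + 1) = c + m' + 5 + e' + 1 from by omega]
      have hne1 : ¬ ((c : Int) + (m' : Int) = -1) := by omega
      have hne2 : ¬ ((m' : Int) = -1) := by omega
      have hne3 : ¬ ((e' : Int) = -1) := by omega
      simp only [hfe, hs1, hs2, hm,
        PySem.Chars.slice_eq_listSlice, List.length_cons, List.length_nil,
        hne1, hne2, if_false, beq_iff_eq,
        List.isEmpty_cons, Bool.false_eq_true]
      rw [show ((c : Int) + (m' : Int) + 5 + (e' : Int) + 1) = ((c + m' + 5 + e' + 1 : Nat) : Int) by push_cast; ring]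
      rw [ih (c + m' + 5 + e' + 1) _ (by omega) (by omega)]
      push_cast
      push_cast at hbrest hbtail
      simp [hbrest, hbtail, heq, hne3, fmtDumpB_eq, PySem.List.slice_to_natCast, List.append_assoc]


theorem format_return_spec : Claim_equal_format_return := by
  intro ret _hdom hpre
  unfold Spec_format_return format_return format_return_alt
  have h := fmt_main (PySem.Chars.strip ret.toList) hpre
      ((PySem.Chars.strip ret.toList).length + 1) 0 [] (by omega) (by omega)
  simp at h
  simp [h]
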